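-- pv_equiv track=rewrite | github.com/moooonam/Algorithm | 백준/IM  대비/빙고.py | bingo_cnt
-- ===== SOURCE A (Python) =====
-- def bingo_cnt(arr):
--     #가로찾기
--     cnt = 0
--
--     for i in range(5):
--         a = 0
--         for j in range(5):
--             a += arr[i][j]
--         if a ==0:
--             cnt += 1
--     #세로 찾기
--     for i in range(5):
--         b = 0
--         for j in range(5):
--             b += arr[j][i]
--         if b == 0:
--             cnt += 1
--     # 대각선 찾기
--     c=0
--     for i in range(5):
--         c +=arr[i][i]
--     if c ==0:
--         cnt+=1
--     d=0
--     for i in range(5):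
--         d += arr[i][4-i]
--     if d == 0:
--         cnt+=1
--     return cnt
-- ===== SOURCE B (Python) =====
-- def bingo_cnt(arr):
--     row_sums = [0] * 5
--     col_sums = [0] * 5
--     main_diag = 0
--     anti_diag = 0
--     for i in range(5):
--         for j in range(5):
--             v = arr[i][j]
--             row_sums[i] += v
--             col_sums[j] += v
--             if i == j:
--                 main_diag += v
--             if i + j == 4:
--                 anti_diag += v
--     return sum(1 for s in row_sums + col_sums + [main_diag, anti_diag] if s == 0)
-- ===== Notes on version B (the rewrite author's own statement) =====
-- stated objective: alternative
-- what changed: Replaces A's four separate scans (row loop, column loop, two diagonal loops) with a single interleaved pass that builds row/column sum tables and both diagonal sums at once, followed by one counting step over the 12 sums.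
import Mathlib
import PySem

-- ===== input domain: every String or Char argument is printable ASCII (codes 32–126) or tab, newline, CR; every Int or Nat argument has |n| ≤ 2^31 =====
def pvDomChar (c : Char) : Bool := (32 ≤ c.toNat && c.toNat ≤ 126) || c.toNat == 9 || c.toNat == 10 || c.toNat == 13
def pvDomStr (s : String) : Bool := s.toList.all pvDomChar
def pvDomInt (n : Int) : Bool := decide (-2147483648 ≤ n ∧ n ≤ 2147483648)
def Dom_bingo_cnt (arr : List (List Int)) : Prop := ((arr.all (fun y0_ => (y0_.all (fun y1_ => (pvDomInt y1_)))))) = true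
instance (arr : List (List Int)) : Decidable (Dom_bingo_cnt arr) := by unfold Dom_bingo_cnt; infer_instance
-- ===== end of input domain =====

-- B replaces A's four separate scans with one interleaved pass that tabulates all
-- row/column/diagonal sums, then a counting step; same cost, different decomposition.

-- ===== PORT A =====
-- arr[i][j] for 0 ≤ i,j < 5; in range under Pre_, default never used there
def pvGetA (arr : List (List Int)) (i j : Nat) : Int := (arr.getD i []).getD j 0

def bingo_cnt (arr : List (List Int)) : Int :=
  -- 가로찾기 (rows)
  let cnt : Int := 0
  let cnt := (List.range 5).foldl (fun cnt i =>
    let a := (List.range 5).foldl (fun a j => a + pvGetA arr i j) (0 : Int)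
    if a = 0 then cnt + 1 else cnt) cnt
  -- 세로 찾기 (columns)
  let cnt := (List.range 5).foldl (fun cnt i =>
    let b := (List.range 5).foldl (fun b j => b + pvGetA arr j i) (0 : Int)
    if b = 0 then cnt + 1 else cnt) cnt
  -- 대각선 찾기 (diagonals)
  let c := (List.range 5).foldl (fun c i => c + pvGetA arr i i) (0 : Int)
  let cnt := if c = 0 then cnt + 1 else cnt
  let d := (List.range 5).foldl (fun d i => d + pvGetA arr i (4 - i)) (0 : Int)
  if d = 0 then cnt + 1 else cnt

-- ===== PORT B =====
def pvGetB (arr : List (List Int)) (i j : Nat) : Int := (arr.getD i []).getD j 0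

-- state = (row_sums, col_sums, main_diag, anti_diag)
def bingo_cnt_alt (arr : List (List Int)) : Int :=
  let st := (List.range 5).foldl (fun st i =>
    (List.range 5).foldl (fun (st : List Int × List Int × Int × Int) j =>
      let v := pvGetB arr i j
      (st.1.set i (st.1.getD i 0 + v),
       st.2.1.set j (st.2.1.getD j 0 + v),
       (if i = j then st.2.2.1 + v else st.2.2.1),
       (if i + j = 4 then st.2.2.2 + v else st.2.2.2))) st)
    (List.replicate 5 (0 : Int), List.replicate 5 (0 : Int), (0 : Int), (0 : Int))
  ((st.1 ++ st.2.1 ++ [st.2.2.1, st.2.2.2]).countP (fun s => s == 0) : Int)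

-- ===== PRECONDITION & SPEC =====
-- Pre_ excludes exactly the inputs where Python A raises IndexError:
-- fewer than 5 rows, or one of the first 5 rows shorter than 5.
def Pre_bingo_cnt (arr : List (List Int)) : Prop :=
  5 ≤ arr.length ∧ ∀ row ∈ arr.take 5, 5 ≤ row.length
instance (arr : List (List Int)) : Decidable (Pre_bingo_cnt arr) := by
  unfold Pre_bingo_cnt; infer_instance

def pvWitness_bingo_cnt : List (List Int) :=
  [[1, -1, 0, 0, 0], [0, 0, 0, 0, 0], [1, 1, 1, 1, 1], [2, 0, 0, 0, -2], [0, 1, 0, -1, 0]]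

def Spec_bingo_cnt (arr : List (List Int)) (out : Int) : Prop := out = bingo_cnt_alt arr
instance (arr : List (List Int)) (out : Int) : Decidable (Spec_bingo_cnt arr out) := by
  unfold Spec_bingo_cnt; infer_instance

-- ===== CLAIM (what is proved, stated in full; the proofs are below) =====
def Claim_equal_bingo_cnt : Prop := ∀ (arr : List (List Int)), Dom_bingo_cnt arr → Pre_bingo_cnt arr → Spec_bingo_cnt arr (bingo_cnt arr)

-- ===== LEMMAS AND PROOFS =====
theorem pv_ite_add (c : Prop) [Decidable c] (n : Int) :
    (if c then n + 1 else n) = n + (if c then 1 else 0) := by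
  split <;> simp

-- ===== VERDICT (by name: the statement is the Claim_ definition above) =====
theorem bingo_cnt_spec : Claim_equal_bingo_cnt := by
  intro arr _ _
  unfold Spec_bingo_cnt bingo_cnt bingo_cnt_alt
  simp [List.range_succ, pv_ite_add, List.countP_cons, pvGetA, pvGetB]
  ring
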